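-- pv_equiv track=rewrite | github.com/arssing/crypto-protocols | sKey/server.py | keyinitValidation
-- ===== SOURCE A (Python) =====
-- import string
--
-- def keyinitValidation(l:list):
-- 	alphanumerics = string.ascii_lowercase + string.digits
-- 	if len(l) == 4:
-- 		if isinstance(l[1].encode('cp437'),bytes) and len(l[1]) == 8:
-- 			if len(l[2]) > 0 and len(l[2]) < 17:
-- 				for i in l[2]:
-- 					if alphanumerics.find(i) == -1:
-- 						return False
-- 				for i in l[3]:
-- 					if string.digits.find(i) == -1:
-- 						return False
-- 				if len(l[3]) > 1 and l[3][0] == '0':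
-- 					return False
-- 				return True
-- 	return False
-- ===== SOURCE B (Python) =====
-- import string
--
-- def _dfa(step, accepting, s):
--     """Run a DFA from state 0 over s; accept iff the final state is accepting."""
--     state = 0
--     for c in s:
--         state = step(state, c)
--     return state in accepting
--
-- def _key_step(state, c):
--     # states 0..16 count accepted [a-z0-9] characters; 17 is the dead state
--     if state <= 15 and (('a' <= c <= 'z') or ('0' <= c <= '9')):
--         return state + 1
--     return 17
--
-- def _nonce_step(state, c):
--     # 0 = start, 1 = seen exactly "0", 2 = number without leading zero, 3 = dead
--     if state == 0:
--         if c == '0':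
--             return 1
--         if '1' <= c <= '9':
--             return 2
--         return 3
--     if state == 2 and '0' <= c <= '9':
--         return 2
--     return 3
--
-- def keyinitValidation(l: list):
--     if len(l) != 4:
--         return False
--     l[1].encode('cp437')  # same encodability requirement as A
--     if len(l[1]) != 8:
--         return False
--     return (_dfa(_key_step, range(1, 17), l[2])
--             and _dfa(_nonce_step, (0, 1, 2), l[3]))
-- ===== Notes on version B (the rewrite author's own statement) =====
-- stated objective: alternative
-- what changed: A's nested length guards plus two imperative character loops with table scans (str.find) and an after-the-fact leading-zero check are replaced by a table-driven finite-state machine: one generic DFA runner executed with a counting automaton for the key field ([a-z0-9]{1,16}) and a 4-state automaton for the nonce whose state graph itself encodes digits-only, empty-allowed, lone '0' allowed and no leading zero.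
import Mathlib
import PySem

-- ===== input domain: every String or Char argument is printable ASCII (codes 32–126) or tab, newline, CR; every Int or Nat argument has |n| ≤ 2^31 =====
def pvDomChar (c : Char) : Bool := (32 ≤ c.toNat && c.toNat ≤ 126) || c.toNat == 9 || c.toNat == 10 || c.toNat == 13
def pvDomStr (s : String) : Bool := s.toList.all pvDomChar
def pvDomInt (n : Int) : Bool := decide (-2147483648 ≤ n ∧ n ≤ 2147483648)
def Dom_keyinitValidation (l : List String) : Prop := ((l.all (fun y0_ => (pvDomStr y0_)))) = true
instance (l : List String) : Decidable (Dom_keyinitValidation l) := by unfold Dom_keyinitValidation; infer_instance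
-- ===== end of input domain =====

-- B replaces A's nested guards and two character-scanning loops by a table-driven
-- finite-state machine (one generic DFA runner, two automata); return values agree on the ASCII domain.

-- ===== PORT A =====
-- A's `alphanumerics = string.ascii_lowercase + string.digits`
def kiAlnum : List Char := "abcdefghijklmnopqrstuvwxyz0123456789".toList
-- `for i in l[2]: if alphanumerics.find(i) == -1: return False`
def kiLoopAlnum : List Char → Bool
  | [] => true
  | c :: r => if PySem.Chars.find kiAlnum [c] == -1 then false else kiLoopAlnum r
-- `for i in l[3]: if string.digits.find(i) == -1: return False`
def kiLoopDigits : List Char → Bool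
  | [] => true
  | c :: r => if PySem.Chars.find "0123456789".toList [c] == -1 then false else kiLoopDigits r

def keyinitValidation (l : List String) : Bool :=
  if l.length == 4 then
    match PySem.List.pyGet? l 1, PySem.List.pyGet? l 2, PySem.List.pyGet? l 3 with
    | some s1, some s2, some s3 =>
      -- `isinstance(l[1].encode('cp437'), bytes)` is True on the ASCII domain (encode
      -- never raises there and always yields bytes), ported as `true`.
      if true && PySem.Chars.len s1.toList == 8 then
        if PySem.Chars.len s2.toList > 0 && PySem.Chars.len s2.toList < 17 then
          if kiLoopAlnum s2.toList then
            if kiLoopDigits s3.toList then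
              if PySem.Chars.len s3.toList > 1 &&
                  ((PySem.List.pyGet? s3.toList 0).getD ' ' == '0') then false
              else true
            else false
          else false
        else false
      else false
    | _, _, _ => false  -- unreachable when length = 4
  else false

-- ===== PORT B =====
-- `_dfa`: run a DFA from state 0 over s; accept iff the final state is accepting
def kiDfaRun (step : Nat → Char → Nat) (accepting : List Nat) (s : List Char) : Bool :=
  accepting.contains (s.foldl step 0)

-- `_key_step`: states 0..16 count accepted [a-z0-9] characters; 17 is the dead state
def kiKeyStep (state : Nat) (c : Char) : Nat :=
  if state ≤ 15 ∧ (('a' ≤ c ∧ c ≤ 'z') ∨ ('0' ≤ c ∧ c ≤ '9')) then state + 1 else 17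

-- `_nonce_step`: 0 = start, 1 = seen exactly "0", 2 = number without leading zero, 3 = dead
def kiNonceStep (state : Nat) (c : Char) : Nat :=
  if state = 0 then
    if c = '0' then 1
    else if '1' ≤ c ∧ c ≤ '9' then 2
    else 3
  else if state = 2 ∧ ('0' ≤ c ∧ c ≤ '9') then 2
  else 3

def keyinitValidation_alt (l : List String) : Bool :=
  if l.length != 4 then false
  else
    match PySem.List.pyGet? l 1 with
    | none => false  -- unreachable when length = 4
    | some name =>
    match PySem.List.pyGet? l 2 with
    | none => false  -- unreachable when length = 4
    | some key =>
    match PySem.List.pyGet? l 3 with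
    | none => false  -- unreachable when length = 4
    | some nonce =>
      -- `name.encode('cp437')` succeeds on the ASCII domain: no effect on the result.
      if PySem.Chars.len name.toList != 8 then false
      else
        -- `range(1, 17)` is the accepting set [1, …, 16]
        kiDfaRun kiKeyStep (List.range' 1 16) key.toList
          && kiDfaRun kiNonceStep [0, 1, 2] nonce.toList

-- ===== PRECONDITION & SPEC =====
def Spec_keyinitValidation (l : List String) (out : Bool) : Prop := out = keyinitValidation_alt l
instance (l : List String) (out : Bool) : Decidable (Spec_keyinitValidation l out) := by unfold Spec_keyinitValidation; infer_instance

-- ===== CLAIM (what is proved, stated in full; the proofs are below) =====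
def Claim_equal_keyinitValidation : Prop := ∀ (l : List String), Dom_keyinitValidation l → Spec_keyinitValidation l (keyinitValidation l)

-- ===== LEMMAS AND PROOFS =====

def kiIsAlnumB (c : Char) : Bool := decide (('a' ≤ c ∧ c ≤ 'z') ∨ ('0' ≤ c ∧ c ≤ '9'))
def kiIsDigitB (c : Char) : Bool := decide ('0' ≤ c ∧ c ≤ '9')

-- On the ASCII domain, A's `alphanumerics.find(c) == -1` is the negation of B's char class.
set_option maxRecDepth 8192 in
lemma ki_alnum_char (c : Char) (h : pvDomChar c = true) :
    (PySem.Chars.find kiAlnum [c] == -1) = !(kiIsAlnumB c) := by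
  have hlt : c.toNat < 127 := by simp [pvDomChar] at h; omega
  have key : ∀ n : Nat, n < 127 →
      (PySem.Chars.find kiAlnum [Char.ofNat n] == -1) = !(kiIsAlnumB (Char.ofNat n)) := by decide
  have hc : Char.ofNat c.toNat = c := Char.ofNat_toNat c
  simpa [hc] using key c.toNat hlt

set_option maxRecDepth 8192 in
lemma ki_digit_char (c : Char) (h : pvDomChar c = true) :
    (PySem.Chars.find "0123456789".toList [c] == -1) = !(kiIsDigitB c) := by
  have hlt : c.toNat < 127 := by simp [pvDomChar] at h; omega
  have key : ∀ n : Nat, n < 127 →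
      (PySem.Chars.find "0123456789".toList [Char.ofNat n] == -1)
        = !(kiIsDigitB (Char.ofNat n)) := by decide
  have hc : Char.ofNat c.toNat = c := Char.ofNat_toNat c
  simpa [hc] using key c.toNat hlt

lemma kiLoopAlnum_eq (cs : List Char) (h : ∀ c ∈ cs, pvDomChar c = true) :
    kiLoopAlnum cs = cs.all kiIsAlnumB := by
  induction cs with
  | nil => rfl
  | cons c r ih =>
    have hc := ki_alnum_char c (h c (by simp))
    have hr := ih (fun x hx => h x (by simp [hx]))
    simp only [kiLoopAlnum, hc, List.all_cons, hr]
    cases kiIsAlnumB c <;> simp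

lemma kiLoopDigits_eq (cs : List Char) (h : ∀ c ∈ cs, pvDomChar c = true) :
    kiLoopDigits cs = cs.all kiIsDigitB := by
  induction cs with
  | nil => rfl
  | cons c r ih =>
    have hc := ki_digit_char c (h c (by simp))
    have hr := ih (fun x hx => h x (by simp [hx]))
    simp only [kiLoopDigits, hc, List.all_cons, hr]
    cases kiIsDigitB c <;> simp

-- dead state of the key automaton is absorbing
lemma kiKey_dead (cs : List Char) : cs.foldl kiKeyStep 17 = 17 := by
  induction cs with
  | nil => rfl
  | cons c r ih => simpa [List.foldl_cons, kiKeyStep] using ih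

-- exact value of the key automaton's run from any live state
lemma kiKey_run (cs : List Char) (n : Nat) (hn : n ≤ 16) :
    cs.foldl kiKeyStep n =
      if cs.all kiIsAlnumB ∧ n + cs.length ≤ 16 then n + cs.length else 17 := by
  induction cs generalizing n with
  | nil => simp [hn]
  | cons c r ih =>
    by_cases hc : kiIsAlnumB c = true
    · have hc' : ('a' ≤ c ∧ c ≤ 'z') ∨ ('0' ≤ c ∧ c ≤ '9') := by
        simpa [kiIsAlnumB] using hc
      by_cases hn15 : n ≤ 15
      · have : kiKeyStep n c = n + 1 := by simp [kiKeyStep, hn15, hc']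
        rw [List.foldl_cons, this, ih (n + 1) (by omega)]
        simp only [List.all_cons, hc, Bool.true_and, List.length_cons]
        by_cases hr : r.all kiIsAlnumB = true <;> split_ifs <;> simp_all <;> omega
      · have hn16 : n = 16 := by omega
        have : kiKeyStep n c = 17 := by simp [kiKeyStep, hn15]
        rw [List.foldl_cons, this, kiKey_dead]
        have : ¬ (r.all kiIsAlnumB = true ∧ n + (c :: r).length ≤ 16) := by
          simp [hn16]
        simp only [List.all_cons, hc, Bool.true_and]
        rw [if_neg this]
    · have : kiKeyStep n c = 17 := by
        have : ¬ (('a' ≤ c ∧ c ≤ 'z') ∨ ('0' ≤ c ∧ c ≤ '9')) := by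
          simpa [kiIsAlnumB] using hc
        simp [kiKeyStep, this]
      rw [List.foldl_cons, this, kiKey_dead]
      simp [List.all_cons, hc]

-- B's key DFA acceptance = A's length window + all-alphanumeric condition
lemma kiKey_accept (cs : List Char) :
    kiDfaRun kiKeyStep (List.range' 1 16) cs
      = (cs.all kiIsAlnumB && decide (1 ≤ cs.length) && decide (cs.length ≤ 16)) := by
  unfold kiDfaRun
  rw [kiKey_run cs 0 (by omega)]
  have hmem : ∀ m : Nat, ((List.range' 1 16).contains m) = (decide (1 ≤ m) && decide (m ≤ 16)) := by
    intro m
    simp [List.mem_range']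
    rw [← Bool.decide_and, decide_eq_decide]
    constructor
    · rintro ⟨i, hi, rfl⟩; omega
    · rintro ⟨h1, h2⟩; exact ⟨m - 1, by omega, by omega⟩
  split_ifs with h
  · obtain ⟨ha, hl⟩ := h
    rw [hmem]
    simp_all
  · rw [hmem]
    by_cases ha : cs.all kiIsAlnumB = true <;> simp_all

-- nonce automaton: dead state absorbing
lemma kiNonce_dead (cs : List Char) : cs.foldl kiNonceStep 3 = 3 := by
  induction cs with
  | nil => rfl
  | cons c r ih => simpa [List.foldl_cons, kiNonceStep] using ih

-- nonce automaton from state 1 ("0" seen): any further char kills it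
lemma kiNonce_run1 (cs : List Char) :
    cs.foldl kiNonceStep 1 = if cs.isEmpty then 1 else 3 := by
  cases cs with
  | nil => rfl
  | cons c r => simp [List.foldl_cons, kiNonceStep, kiNonce_dead]

-- nonce automaton from state 2: stays live iff all remaining chars are digits
lemma kiNonce_run2 (cs : List Char) :
    cs.foldl kiNonceStep 2 = if cs.all kiIsDigitB then 2 else 3 := by
  induction cs with
  | nil => rfl
  | cons c r ih =>
    by_cases hc : kiIsDigitB c = true
    · have hc' : '0' ≤ c ∧ c ≤ '9' := by simpa [kiIsDigitB] using hc
      rw [List.foldl_cons, show kiNonceStep 2 c = 2 by simp [kiNonceStep, hc'], ih]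
      simp [List.all_cons, hc]
    · have hc' : ¬ ('0' ≤ c ∧ c ≤ '9') := by simpa [kiIsDigitB] using hc
      rw [List.foldl_cons, show kiNonceStep 2 c = 3 by simp [kiNonceStep, hc'], kiNonce_dead]
      simp [List.all_cons, hc]

-- B's nonce DFA acceptance = A's digits loop + fall-through leading-zero test
lemma kiNonce_accept (cs : List Char) :
    kiDfaRun kiNonceStep [0, 1, 2] cs
      = (cs.all kiIsDigitB &&
          !(decide (1 < cs.length) && ((PySem.List.pyGet? cs 0).getD ' ' == '0'))) := by
  unfold kiDfaRun
  cases cs with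
  | nil => decide
  | cons c r =>
    by_cases h0 : c = '0'
    · subst h0
      rw [List.foldl_cons, show kiNonceStep 0 '0' = 1 by decide, kiNonce_run1]
      cases r with
      | nil => decide
      | cons d t =>
        rw [PySem.List.pyGet?_zero_cons]
        simp [List.all_cons, List.isEmpty]
    · by_cases h19 : '1' ≤ c ∧ c ≤ '9'
      · rw [List.foldl_cons, show kiNonceStep 0 c = 2 by simp [kiNonceStep, h0, h19],
          kiNonce_run2]
        have hd : kiIsDigitB c = true := by
          simp only [kiIsDigitB, decide_eq_true_eq]
          exact ⟨le_trans (by decide) h19.1, h19.2⟩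
        have hne : (c == '0') = false := by simpa using h0
        by_cases hr : r.all kiIsDigitB = true <;>
          simp [List.all_cons, hd, hr, PySem.List.pyGet?, PySem.List.pyIdx?, hne]
      · have hd : kiIsDigitB c = false := by
          simp only [kiIsDigitB, decide_eq_false_iff_not]
          intro ⟨ha, hb⟩
          rcases lt_or_eq_of_le ha with h | h
          · exact h19 ⟨h, hb⟩
          · exact h0 h.symm
        rw [List.foldl_cons, show kiNonceStep 0 c = 3 by simp [kiNonceStep, h0, h19],
          kiNonce_dead]
        simp [List.all_cons, hd]

-- ===== VERDICT (by name: the statement is the Claim_ definition above) =====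
theorem keyinitValidation_spec : Claim_equal_keyinitValidation := by
  intro l hd
  unfold Spec_keyinitValidation
  match l with
  | [] => rfl
  | [_] => rfl
  | [_, _] => rfl
  | [_, _, _] => rfl
  | _ :: _ :: _ :: _ :: _ :: _ => rfl
  | [a, s1, s2, s3] =>
    have hdom : pvDomStr s2 = true ∧ pvDomStr s3 = true := by
      simp [Dom_keyinitValidation] at hd; tauto
    have h2 : ∀ c ∈ s2.toList, pvDomChar c = true := by
      have := hdom.1; simp [pvDomStr, List.all_eq_true] at this; exact this
    have h3 : ∀ c ∈ s3.toList, pvDomChar c = true := by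
      have := hdom.2; simp [pvDomStr, List.all_eq_true] at this; exact this
    simp only [keyinitValidation, keyinitValidation_alt]
    simp only [PySem.List.pyGet?, PySem.List.pyIdx?]
    norm_num
    simp only [show ((2:Int).toNat) = 2 from rfl, show ((3:Int).toNat) = 3 from rfl,
      List.getElem_cons_succ, List.getElem_cons_zero]
    rw [kiLoopAlnum_eq s2.toList h2, kiLoopDigits_eq s3.toList h3,
      kiKey_accept, kiNonce_accept]
    have hlen : (decide (0 < s2.length) && decide (s2.length < 17))
        = (decide (1 ≤ s2.length) && decide (s2.length ≤ 16)) := by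
      simp [Nat.lt_succ_iff, Nat.pos_iff_ne_zero, Nat.one_le_iff_ne_zero]
    rw [hlen]
    simp only [beq_eq_decide]
    norm_num [PySem.List.pyGet?, PySem.List.pyIdx?, String.length_toList]
    generalize (decide ((s1.length : Int) = 8)) = g1
    generalize (decide (1 ≤ s2.length)) = g2
    generalize (decide (s2.length ≤ 16)) = g3
    generalize (s2.toList.all kiIsAlnumB) = g4
    generalize (s3.toList.all kiIsDigitB) = g5
    generalize (decide (1 < s3.length)) = g6
    generalize (decide ((((if 0 < s3.length then some 0 else none).bind fun a => s3.toList[a]?).getD ' ') = '0')) = g7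
    revert g1 g2 g3 g4 g5 g6 g7
    decide
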